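-- pv_equiv track=rewrite | github.com/McGrude/CX16_Space_Game | universe_builder/phase_2_alien_artifacts/phase_2_alien_artifacts.py | choose_artifact_type
-- ===== SOURCE A (Python) =====
-- from typing import List, Tuple
--
-- ARTIFACT_TYPES: List[Tuple[str, int]] = [
--     ("ARC", 40),  # Alien Relic / Data Crystal
--     ("RUI", 25),  # Ruined Surface Complex
--     ("FAC", 15),  # Abandoned Orbital Facility
--     ("BEA", 10),  # Beacon / Signal Source
--     ("ENG", 7),   # Exotic Energy Node
--     ("TEC", 3),   # Technology Cache
-- ]
--
-- def choose_artifact_type(h_extra: int) -> str: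
--     """Choose an artifact type from ARTIFACT_TYPES using h_extra as a source of entropy."""
--     total = sum(weight for _, weight in ARTIFACT_TYPES)
--     r = h_extra % total
--     acc = 0
--     for code, weight in ARTIFACT_TYPES:
--         acc += weight
--         if r < acc:
--             return code
--     return ARTIFACT_TYPES[-1][0]
-- ===== SOURCE B (Python) =====
-- from typing import List, Tuple
--
-- ARTIFACT_TYPES: List[Tuple[str, int]] = [
--     ("ARC", 40),
--     ("RUI", 25),
--     ("FAC", 15),
--     ("BEA", 10),
--     ("ENG", 7),
--     ("TEC", 3),
-- ]
--
-- _TABLE: List[str] = [code for code, weight in ARTIFACT_TYPES for _ in range(weight)]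
--
-- def choose_artifact_type(h_extra: int) -> str:
--     """Choose an artifact type from ARTIFACT_TYPES using h_extra as a source of entropy."""
--     return _TABLE[h_extra % len(_TABLE)]
-- ===== Notes on version B (the rewrite author's own statement) =====
-- stated objective: simpler
-- what changed: Replaced A's per-call accumulate-and-compare scan over the weighted list with a 100-entry lookup table built once (each code repeated weight times) indexed directly by the modulo of h_extra by the table length.
import Mathlib
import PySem

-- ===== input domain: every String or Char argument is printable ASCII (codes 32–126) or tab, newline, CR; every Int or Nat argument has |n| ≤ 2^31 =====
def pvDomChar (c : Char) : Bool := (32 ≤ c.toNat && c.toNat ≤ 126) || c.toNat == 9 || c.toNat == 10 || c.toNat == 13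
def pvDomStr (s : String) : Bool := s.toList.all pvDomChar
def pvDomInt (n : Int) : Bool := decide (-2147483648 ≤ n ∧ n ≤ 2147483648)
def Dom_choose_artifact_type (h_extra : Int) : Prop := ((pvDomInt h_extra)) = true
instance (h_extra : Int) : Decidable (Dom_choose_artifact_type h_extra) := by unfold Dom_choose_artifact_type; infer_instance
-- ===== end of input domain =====

-- B replaces A's accumulate-and-compare scan by a flat 100-entry lookup table (each
-- code repeated weight times) indexed directly by the residue modulo the table length (objective: simpler).

-- ===== PORT A =====
def ARTIFACT_TYPES : List (String × Int) :=
  [("ARC", 40), ("RUI", 25), ("FAC", 15), ("BEA", 10), ("ENG", 7), ("TEC", 3)]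

-- A's for-loop with the running accumulator `acc`; returns the first code with r < acc.
def chooseLoopA : List (String × Int) → Int → Int → String
  | [], _, _ => "TEC"   -- A's fallback `ARTIFACT_TYPES[-1][0]` (never reached)
  | (code, weight) :: rest, r, acc =>
      let acc := acc + weight
      if r < acc then code else chooseLoopA rest r acc

def choose_artifact_type (h_extra : Int) : String :=
  let total : Int := (ARTIFACT_TYPES.map (·.2)).sum
  let r := PySem.Int.mod h_extra total
  chooseLoopA ARTIFACT_TYPES r 0

-- ===== PORT B =====
-- Source B's _TABLE comprehension: each code repeated `weight` times.
def artifactTable : List String :=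
  ARTIFACT_TYPES.flatMap (fun p => List.replicate p.2.toNat p.1)

def choose_artifact_type_alt (h_extra : Int) : String :=
  let r := PySem.Int.mod h_extra (artifactTable.length : Int)
  (PySem.List.pyGet? artifactTable r).getD ""   -- index is always in range; getD totalises

-- ===== PRECONDITION & SPEC =====
def Spec_choose_artifact_type (h_extra : Int) (out : String) : Prop := out = choose_artifact_type_alt h_extra
instance (h_extra : Int) (out : String) : Decidable (Spec_choose_artifact_type h_extra out) := by unfold Spec_choose_artifact_type; infer_instance

-- ===== CLAIM (what is proved, stated in full; the proofs are below) =====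
def Claim_equal_choose_artifact_type : Prop := ∀ (h_extra : Int), Dom_choose_artifact_type h_extra → Spec_choose_artifact_type h_extra (choose_artifact_type h_extra)

-- ===== LEMMAS AND PROOFS =====

-- Both ports depend only on h_extra % 100; check the 100 residues by computation.
set_option maxRecDepth 4000 in
lemma ports_agree_on_residues :
    ∀ n : Nat, n < 100 →
      choose_artifact_type (n : Int) = choose_artifact_type_alt (n : Int) := by
  decide

lemma choose_A_mod (h_extra : Int) :
    choose_artifact_type h_extra
      = choose_artifact_type ((PySem.Int.mod h_extra 100).toNat : Int) := by
  have h0 : (0:Int) < 100 := by norm_num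
  have hn := PySem.Int.mod_nonneg h_extra h0
  have hl := PySem.Int.mod_lt h_extra h0
  have hcast : ((PySem.Int.mod h_extra 100).toNat : Int) = PySem.Int.mod h_extra 100 := by omega
  show chooseLoopA ARTIFACT_TYPES (PySem.Int.mod h_extra 100) 0 = _
  rw [show choose_artifact_type ((PySem.Int.mod h_extra 100).toNat : Int)
      = chooseLoopA ARTIFACT_TYPES (PySem.Int.mod ((PySem.Int.mod h_extra 100).toNat : Int) 100) 0 from rfl]
  congr 1
  rw [hcast, PySem.Int.mod_eq_emod_of_pos h0, PySem.Int.mod_eq_emod_of_pos h0,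
      Int.emod_emod_of_dvd _ (dvd_refl _)]

lemma choose_B_mod (h_extra : Int) :
    choose_artifact_type_alt h_extra
      = choose_artifact_type_alt ((PySem.Int.mod h_extra 100).toNat : Int) := by
  have h0 : (0:Int) < 100 := by norm_num
  have hn := PySem.Int.mod_nonneg h_extra h0
  have hl := PySem.Int.mod_lt h_extra h0
  have hcast : ((PySem.Int.mod h_extra 100).toNat : Int) = PySem.Int.mod h_extra 100 := by omega
  show (PySem.List.pyGet? artifactTable (PySem.Int.mod h_extra (artifactTable.length : Int))).getD ""
      = (PySem.List.pyGet? artifactTable (PySem.Int.mod ((PySem.Int.mod h_extra 100).toNat : Int) (artifactTable.length : Int))).getD ""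
  have hlen : (artifactTable.length : Int) = 100 := by decide
  rw [hlen]
  congr 2
  rw [hcast, PySem.Int.mod_eq_emod_of_pos h0, PySem.Int.mod_eq_emod_of_pos h0,
      Int.emod_emod_of_dvd _ (dvd_refl _)]

-- ===== VERDICT (by name: the statement is the Claim_ definition above) =====
theorem choose_artifact_type_spec : Claim_equal_choose_artifact_type := by
  intro h_extra _
  have h0 : (0:Int) < 100 := by norm_num
  have hn := PySem.Int.mod_nonneg h_extra h0
  have hl := PySem.Int.mod_lt h_extra h0
  have hlt : (PySem.Int.mod h_extra 100).toNat < 100 := by omega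
  show choose_artifact_type h_extra = choose_artifact_type_alt h_extra
  rw [choose_A_mod, choose_B_mod]
  exact ports_agree_on_residues _ hlt
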